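-- pv_equiv track=rewrite | github.com/smithdrimer-hub/feishu-campus-hackathon | openclaw-memory/src/adapters/lark_cli_adapter.py | _extract_doc_token
-- ===== SOURCE A (Python) =====
-- def _extract_doc_token(doc: str) -> str:
--     """V1.12: 从飞书文档 URL 中提取 doc token。
--
--     支持格式:
--     - https://xxx.feishu.cn/docx/Abc123 → Abc123
--     - https://xxx.feishu.cn/docs/Abc123 → Abc123
--     - doc_xxx → 原样返回
--     - Abc123 (纯 token) → 原样返回
--     """
--     if not doc:
--         return doc
--     # 从 URL 中提取 token
--     for prefix in ("/docx/", "/docs/"):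
--         if prefix in doc:
--             token = doc.split(prefix, 1)[-1]
--             # 去掉 query string 和 fragment
--             token = token.split("?")[0].split("#")[0]
--             return token.strip()
--     return doc
-- ===== SOURCE B (Python) =====
-- def _extract_doc_token(doc: str) -> str:
--     if not doc:
--         return doc
--     i = doc.find("/docx/")
--     if i == -1:
--         i = doc.find("/docs/")
--     if i == -1:
--         return doc
--     token = []
--     for ch in doc[i + 6:]:
--         if ch == "?" or ch == "#":
--             break
--         token.append(ch)
--     return "".join(token).strip()
-- ===== Notes on version B (the rewrite author's own statement) =====
-- stated objective: simpler
-- what changed: Replaces the prefix loop with `in`-test plus a three-way split chain by a single find of the prefix index followed by one character scan that stops at the first query/fragment delimiter, so no intermediate split lists are built.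
import Mathlib
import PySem

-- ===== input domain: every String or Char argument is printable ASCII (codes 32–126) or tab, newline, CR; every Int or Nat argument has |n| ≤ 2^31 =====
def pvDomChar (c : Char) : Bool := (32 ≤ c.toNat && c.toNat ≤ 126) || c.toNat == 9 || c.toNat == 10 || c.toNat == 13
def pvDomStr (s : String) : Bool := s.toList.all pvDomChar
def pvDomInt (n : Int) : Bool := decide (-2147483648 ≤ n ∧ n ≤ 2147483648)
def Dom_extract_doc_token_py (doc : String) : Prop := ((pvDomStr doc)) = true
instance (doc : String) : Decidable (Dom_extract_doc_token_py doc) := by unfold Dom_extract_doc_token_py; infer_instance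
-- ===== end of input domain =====

-- B replaces A's prefix loop + split chain by one find of the prefix index and one
-- character scan stopping at the first '?' or '#' (objective: simpler; return value only).

-- ===== PORT A =====
-- the body of A's `for prefix in (...)` loop, for the prefix that matched;
-- split with a nonempty separator always returns `some` of a nonempty list, so the
-- `.getD` defaults below are unreachable
-- token = doc.split(prefix, 1)[-1]
def pvTok1 (doc p : String) : String :=
  (PySem.List.pyGet? ((PySem.Str.splitMax? doc p 1).getD []) (-1)).getD ""

-- token = token.split("?")[0]
def pvTok2 (t : String) : String :=
  (PySem.List.pyGet? ((PySem.Str.split? t "?").getD []) 0).getD ""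

-- token = token.split("#")[0]
def pvTok3 (t : String) : String :=
  (PySem.List.pyGet? ((PySem.Str.split? t "#").getD []) 0).getD ""

def pvABody (doc p : String) : String :=
  -- token = doc.split(prefix, 1)[-1]
  -- token = token.split("?")[0].split("#")[0]
  -- return token.strip()
  PySem.Str.strip (pvTok3 (pvTok2 (pvTok1 doc p)))

def extract_doc_token_py (doc : String) : String :=
  if doc = "" then doc
  else if PySem.Str.isIn "/docx/" doc then pvABody doc "/docx/"
  else if PySem.Str.isIn "/docs/" doc then pvABody doc "/docs/"
  else doc

-- ===== PORT B =====
-- the `for ch in …: if ch == "?" or ch == "#": break; token.append(ch)` loop of Source B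
def pvCollect : List Char → List Char
  | [] => []
  | c :: rest => if c = '?' || c = '#' then [] else c :: pvCollect rest

def extract_doc_token_py_alt (doc : String) : String :=
  if doc = "" then doc
  else
    let i0 := PySem.Str.find doc "/docx/"
    let i := if i0 = -1 then PySem.Str.find doc "/docs/" else i0
    if i = -1 then doc
    else PySem.Str.strip (String.ofList (pvCollect (PySem.Str.slice doc (some (i + 6)) none).toList))

-- ===== PRECONDITION & SPEC =====
def Spec_extract_doc_token_py (doc : String) (out : String) : Prop := out = extract_doc_token_py_alt doc
instance (doc : String) (out : String) : Decidable (Spec_extract_doc_token_py doc out) := by unfold Spec_extract_doc_token_py; infer_instance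

-- ===== CLAIM (what is proved, stated in full; the proofs are below) =====
def Claim_equal_extract_doc_token_py : Prop := ∀ (doc : String), Dom_extract_doc_token_py doc → Spec_extract_doc_token_py doc (extract_doc_token_py doc)

-- ===== LEMMAS AND PROOFS =====

-- the (before, after) parts of the first occurrence of sep, if any
def pvFirstCut (sep : List Char) : List Char → Option (List Char × List Char)
  | [] => none
  | c :: rest =>
      if sep.isPrefixOf (c :: rest) then some ([], (c :: rest).drop sep.length)
      else (pvFirstCut sep rest).map (fun ba => (c :: ba.1, ba.2))

-- the part before the first occurrence of sep (the whole list if none)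
def pvTakeUntil (sep l : List Char) : List Char :=
  match pvFirstCut sep l with
  | some ba => ba.1
  | none => l

theorem pvFirstCut_cons_pos (sep : List Char) (c : Char) (rest : List Char)
    (hp : sep.isPrefixOf (c :: rest) = true) :
    pvFirstCut sep (c :: rest) = some ([], (c :: rest).drop sep.length) := by
  simp [pvFirstCut, hp]

theorem pvFirstCut_cons_neg (sep : List Char) (c : Char) (rest : List Char)
    (hp : ¬ sep.isPrefixOf (c :: rest) = true) :
    pvFirstCut sep (c :: rest) = (pvFirstCut sep rest).map (fun ba => (c :: ba.1, ba.2)) := by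
  simp [pvFirstCut, hp]

theorem pvFirstCut_none_iff (sep l : List Char) (hsep : sep ≠ []) :
    pvFirstCut sep l = none ↔ ¬ sep <:+: l := by
  induction l with
  | nil =>
    constructor
    · intro _ h
      exact hsep (List.eq_nil_of_infix_nil h)
    · intro _; rfl
  | cons c rest ih =>
    by_cases hp : sep.isPrefixOf (c :: rest) = true
    · rw [pvFirstCut_cons_pos sep c rest hp]
      constructor
      · intro h; cases h
      · intro h; exact absurd ((List.isPrefixOf_iff_prefix.mp hp).isInfix) h
    · rw [pvFirstCut_cons_neg sep c rest hp, Option.map_eq_none_iff, ih, List.infix_cons_iff]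
      constructor
      · rintro h (hpre | hinf)
        · exact hp (List.isPrefixOf_iff_prefix.mpr hpre)
        · exact h hinf
      · intro h hinf; exact h (Or.inr hinf)

theorem pvFirstCut_spec (sep l b a : List Char) (h : pvFirstCut sep l = some (b, a)) :
    sep <+: l.drop b.length ∧ (∀ i < b.length, ¬ sep <+: l.drop i) ∧
      a = l.drop (b.length + sep.length) := by
  induction l generalizing b a with
  | nil => simp [pvFirstCut] at h
  | cons c rest ih =>
    by_cases hp : sep.isPrefixOf (c :: rest) = true
    · rw [pvFirstCut_cons_pos sep c rest hp] at h
      simp only [Option.some.injEq, Prod.mk.injEq] at h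
      obtain ⟨hb, ha⟩ := h
      subst hb; subst ha
      refine ⟨List.isPrefixOf_iff_prefix.mp hp, ?_, by simp⟩
      intro i hi
      simp at hi
    · rw [pvFirstCut_cons_neg sep c rest hp, Option.map_eq_some_iff] at h
      obtain ⟨⟨b', a'⟩, hcut, heq⟩ := h
      simp only [Prod.mk.injEq] at heq
      obtain ⟨hb, ha⟩ := heq
      obtain ⟨h1, h2, h3⟩ := ih b' a' hcut
      subst hb; subst ha
      refine ⟨by simpa using h1, ?_, ?_⟩
      · intro i hi
        cases i with
        | zero =>
          simp only [List.drop_zero]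
          intro hpre; exact hp (List.isPrefixOf_iff_prefix.mpr hpre)
        | succ j =>
          simp only [List.drop_succ_cons]
          exact h2 j (by simpa using hi)
      · simp only [List.length_cons]
        rw [show b'.length + 1 + sep.length = (b'.length + sep.length) + 1 by omega]
        simpa using h3

theorem pvFirstCut_before (sep : List Char) :
    ∀ (l b a : List Char), pvFirstCut sep l = some (b, a) → b = l.take b.length := by
  intro l
  induction l with
  | nil => intro b a h; simp [pvFirstCut] at h
  | cons c rest ih =>
    intro b a h
    by_cases hp : sep.isPrefixOf (c :: rest) = true
    · rw [pvFirstCut_cons_pos sep c rest hp] at h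
      simp only [Option.some.injEq, Prod.mk.injEq] at h
      simp [← h.1]
    · rw [pvFirstCut_cons_neg sep c rest hp, Option.map_eq_some_iff] at h
      obtain ⟨⟨b', a'⟩, hcut, heq⟩ := h
      simp only [Prod.mk.injEq] at heq
      obtain ⟨hb, ha⟩ := heq
      subst hb
      simp only [List.length_cons, List.take_succ_cons, List.cons.injEq, true_and]
      exact ih b' a' hcut

theorem pvFirstCut_of_infix (sep l : List Char) (hsep : sep ≠ []) (h : sep <:+: l) :
    pvFirstCut sep l =
      some (l.take (PySem.Chars.find l sep).toNat,
            l.drop ((PySem.Chars.find l sep).toNat + sep.length)) := by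
  have hnn : 0 ≤ PySem.Chars.find l sep := (PySem.Chars.find_nonneg_iff l sep).mpr h
  obtain ⟨hfpre, hfmin⟩ := PySem.Chars.find_spec hnn
  cases hcut : pvFirstCut sep l with
  | none => exact absurd h ((pvFirstCut_none_iff sep l hsep).mp hcut)
  | some ba =>
    obtain ⟨b, a⟩ := ba
    obtain ⟨h1, h2, h3⟩ := pvFirstCut_spec sep l b a hcut
    have hlen : b.length = (PySem.Chars.find l sep).toNat := by
      rcases Nat.lt_trichotomy b.length (PySem.Chars.find l sep).toNat with hlt | heq | hgt
      · exact absurd h1 (hfmin b.length hlt)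
      · exact heq
      · exact absurd hfpre (h2 _ hgt)
    have hb : b = l.take (PySem.Chars.find l sep).toNat :=
      hlen ▸ pvFirstCut_before sep l b a hcut
    rw [hb, h3, hlen]

theorem pvTakeUntil_cons (sep : List Char) (c : Char) (rest : List Char)
    (hp : ¬ sep.isPrefixOf (c :: rest) = true) :
    pvTakeUntil sep (c :: rest) = c :: pvTakeUntil sep rest := by
  unfold pvTakeUntil
  rw [pvFirstCut_cons_neg sep c rest hp]
  cases pvFirstCut sep rest <;> simp

theorem pvCollect_eq_takeUntil (l : List Char) :
    pvCollect l = pvTakeUntil ['#'] (pvTakeUntil ['?'] l) := by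
  induction l with
  | nil => simp [pvCollect, pvTakeUntil, pvFirstCut]
  | cons c rest ih =>
    by_cases hq : c = '?'
    · subst hq
      rw [show pvTakeUntil ['?'] ('?' :: rest) = [] from by
        unfold pvTakeUntil; simp [pvFirstCut, List.isPrefixOf]]
      simp [pvCollect, pvTakeUntil, pvFirstCut]
    · rw [show pvTakeUntil ['?'] (c :: rest) = c :: pvTakeUntil ['?'] rest from
        pvTakeUntil_cons _ _ _ (by simp [List.isPrefixOf]; exact fun h => hq h.symm)]
      by_cases hh : c = '#'
      · subst hh
        have : pvTakeUntil ['#'] ('#' :: pvTakeUntil ['?'] rest) = [] := by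
          unfold pvTakeUntil; simp [pvFirstCut, List.isPrefixOf]
        simp [pvCollect, this]
      · rw [pvTakeUntil_cons _ _ _ (by simp [List.isPrefixOf]; exact fun h => hh h.symm)]
        simp only [pvCollect, ih]
        simp [hq, hh]

-- after the maxsplit is used up, splitOnMax.go dumps the rest as one piece
theorem pvSplitOnMaxGo_zero (sep : List Char) (fuel : Nat) (l : List Char)
    (acc : List (List Char)) :
    PySem.Chars.splitOnMax.go sep fuel 0 l [] acc = (l :: acc).reverse := by
  rw [PySem.Chars.splitOnMax.go.eq_def]
  cases fuel with
  | zero => simp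
  | succ f => cases l with
    | nil => simp
    | cons c rest => simp

theorem pvSplitOnMaxGo_one (sep : List Char) (l : List Char) :
    ∀ (fuel : Nat) (cur : List Char) (acc : List (List Char)), l.length < fuel →
    PySem.Chars.splitOnMax.go sep fuel 1 l cur acc =
      (match pvFirstCut sep l with
       | some ba => (ba.2 :: (cur.reverse ++ ba.1) :: acc).reverse
       | none => ((cur.reverse ++ l) :: acc).reverse) := by
  induction l with
  | nil =>
    intro fuel cur acc hf
    cases fuel with
    | zero => omega
    | succ f =>
      rw [PySem.Chars.splitOnMax.go.eq_def]
      simp [pvFirstCut]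
  | cons c rest ih =>
    intro fuel cur acc hf
    cases fuel with
    | zero => simp at hf
    | succ f =>
      rw [PySem.Chars.splitOnMax.go.eq_def]
      simp only [pvFirstCut]
      by_cases hp : sep.isPrefixOf (c :: rest)
      · simp only [hp, reduceIte]
        rw [show (1 : Nat) - 1 = 0 from rfl, pvSplitOnMaxGo_zero]
        simp
      · simp only [hp, Bool.false_eq_true, reduceIte]
        rw [ih f (c :: cur) acc (by simp at hf ⊢; omega)]
        cases hcut : pvFirstCut sep rest with
        | none => simp
        | some ba => simp

theorem pvSplitOnMax_one (sep s : List Char) :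
    PySem.Chars.splitOnMax s sep 1 =
      (match pvFirstCut sep s with
       | some ba => [ba.1, ba.2]
       | none => [s]) := by
  unfold PySem.Chars.splitOnMax
  rw [if_neg (by norm_num)]
  rw [show (1 : Int).toNat = 1 from rfl]
  rw [pvSplitOnMaxGo_one sep s (s.length + 1) [] [] (by omega)]
  cases pvFirstCut sep s with
  | none => simp
  | some ba => simp

-- splitOn.go ignores everything once the first piece is already on acc
theorem pvSplitOnGo_acc (sep : List Char) :
    ∀ (fuel : Nat) (l cur : List Char) (x : List Char) (acc : List (List Char)),
    (PySem.Chars.splitOn.go sep fuel l cur (acc ++ [x])).head? = some x := by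
  intro fuel
  induction fuel with
  | zero =>
    intro l cur x acc
    rw [PySem.Chars.splitOn.go.eq_def]
    simp
  | succ f ih =>
    intro l cur x acc
    rw [PySem.Chars.splitOn.go.eq_def]
    cases l with
    | nil => simp
    | cons c rest =>
      by_cases hp : sep.isPrefixOf (c :: rest)
      · simp only [hp, reduceIte]
        rw [show cur.reverse :: (acc ++ [x]) = (cur.reverse :: acc) ++ [x] from rfl]
        exact ih _ _ _ _
      · simp only [hp, Bool.false_eq_true, reduceIte]
        exact ih _ _ _ _

theorem pvSplitOnGo_head (sep : List Char) (l : List Char) :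
    ∀ (fuel : Nat) (cur : List Char), l.length < fuel →
    (PySem.Chars.splitOn.go sep fuel l cur []).head? = some (cur.reverse ++ pvTakeUntil sep l) := by
  induction l with
  | nil =>
    intro fuel cur hf
    cases fuel with
    | zero => omega
    | succ f =>
      rw [PySem.Chars.splitOn.go.eq_def]
      simp [pvTakeUntil, pvFirstCut]
  | cons c rest ih =>
    intro fuel cur hf
    cases fuel with
    | zero => simp at hf
    | succ f =>
      rw [PySem.Chars.splitOn.go.eq_def]
      by_cases hp : sep.isPrefixOf (c :: rest)
      · simp only [hp, reduceIte]
        have : pvTakeUntil sep (c :: rest) = [] := by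
          unfold pvTakeUntil; simp [pvFirstCut, hp]
        rw [this]
        rw [show cur.reverse :: ([] : List (List Char)) = [] ++ [cur.reverse] from rfl]
        rw [pvSplitOnGo_acc]
        simp
      · simp only [hp, Bool.false_eq_true, reduceIte]
        rw [ih f (c :: cur) (by simp at hf ⊢; omega)]
        rw [pvTakeUntil_cons sep c rest hp]
        simp

theorem pvSplitOn_head (sep l : List Char) :
    (PySem.Chars.splitOn l sep).head? = some (pvTakeUntil sep l) := by
  unfold PySem.Chars.splitOn
  rw [pvSplitOnGo_head sep l (l.length + 1) [] (by omega)]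
  simp

theorem pvPyGet_zero {α : Type} (x : α) (t : List α) (d : α) :
    (PySem.List.pyGet? (x :: t) 0).getD d = x := by
  simp [PySem.List.pyGet?, PySem.List.pyIdx?]

-- head of a full split, through the Str wrapper and the [0] index
theorem pvSplitHead (t : String) (sep : String) (hsep : sep.toList ≠ []) :
    (PySem.List.pyGet? ((PySem.Str.split? t sep).getD []) 0).getD "" =
      String.ofList (pvTakeUntil sep.toList t.toList) := by
  have h : PySem.Chars.split? t.toList sep.toList = some (PySem.Chars.splitOn t.toList sep.toList) := by
    unfold PySem.Chars.split?
    rw [if_neg (by simpa using hsep)]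
  have hmap := PySem.Str.split?_map t sep
  rw [h] at hmap
  obtain ⟨parts, hparts⟩ : ∃ parts, PySem.Str.split? t sep = some parts := by
    cases hp : PySem.Str.split? t sep with
    | none => rw [hp] at hmap; simp at hmap
    | some parts => exact ⟨parts, rfl⟩
  rw [hparts] at hmap ⊢
  simp only [Option.map_some, Option.some.injEq] at hmap
  have hhead := pvSplitOn_head sep.toList t.toList
  rw [← hmap] at hhead
  cases parts with
  | nil => simp at hhead
  | cons p ps =>
    simp only [List.map_cons, List.head?_cons, Option.some.injEq] at hhead
    rw [Option.getD_some, pvPyGet_zero]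
    rw [← hhead]
    simp

-- the matched-prefix branch: A's body equals B's scan of the tail after the prefix
theorem pvBody_eq (doc p : String) (hp : p.toList ≠ []) (h : p.toList <:+: doc.toList) :
    pvABody doc p =
      PySem.Str.strip (String.ofList (pvCollect
        (doc.toList.drop ((PySem.Chars.find doc.toList p.toList).toNat + p.toList.length)))) := by
  unfold pvABody
  have hcut := pvFirstCut_of_infix p.toList doc.toList hp h
  set i := (PySem.Chars.find doc.toList p.toList).toNat with hi
  have hsplitmax : PySem.Chars.splitMax? doc.toList p.toList 1 =
      some [doc.toList.take i, doc.toList.drop (i + p.toList.length)] := by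
    unfold PySem.Chars.splitMax?
    rw [if_neg (by simpa using hp)]
    rw [pvSplitOnMax_one, hcut]
  have hmap := PySem.Str.splitMax?_map doc p 1
  rw [hsplitmax] at hmap
  obtain ⟨parts, hparts⟩ : ∃ parts, PySem.Str.splitMax? doc p 1 = some parts := by
    cases hq : PySem.Str.splitMax? doc p 1 with
    | none => rw [hq] at hmap; simp at hmap
    | some parts => exact ⟨parts, rfl⟩
  rw [hparts] at hmap
  simp only [Option.map_some, Option.some.injEq] at hmap
  obtain ⟨b', a', hpl⟩ : ∃ b' a', parts = [b', a'] := by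
    cases parts with
    | nil => simp at hmap
    | cons x xs => cases xs with
      | nil => simp at hmap
      | cons y ys => cases ys with
        | nil => exact ⟨x, y, rfl⟩
        | cons z zs => simp at hmap
  subst hpl
  simp only [List.map_cons, List.map_nil, List.cons.injEq, and_true] at hmap
  obtain ⟨hb', ha'⟩ := hmap
  have htok1 : pvTok1 doc p = a' := by
    unfold pvTok1
    rw [hparts, Option.getD_some]
    simp [PySem.List.pyGet?, PySem.List.pyIdx?]
  rw [htok1]
  have htok2 : pvTok2 a' = String.ofList (pvTakeUntil ['?'] (doc.toList.drop (i + p.toList.length))) := by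
    unfold pvTok2
    rw [pvSplitHead a' "?" (by decide), ha', show "?".toList = ['?'] from by decide]
  rw [htok2]
  have htok3 : pvTok3 (String.ofList (pvTakeUntil ['?'] (doc.toList.drop (i + p.toList.length)))) =
      String.ofList (pvTakeUntil ['#'] (pvTakeUntil ['?'] (doc.toList.drop (i + p.toList.length)))) := by
    unfold pvTok3
    rw [pvSplitHead _ "#" (by decide)]
    simp
  rw [htok3, pvCollect_eq_takeUntil]

-- ===== VERDICT (by name: the statement is the Claim_ definition above) =====
theorem extract_doc_token_py_spec : Claim_equal_extract_doc_token_py := by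
  intro doc _
  unfold Spec_extract_doc_token_py extract_doc_token_py extract_doc_token_py_alt
  by_cases hempty : doc = ""
  · simp [hempty]
  rw [if_neg hempty, if_neg hempty]
  simp only [PySem.Str.isIn_eq, PySem.Str.find_eq]
  set s := doc.toList with hs
  by_cases hx : PySem.Chars.isIn "/docx/".toList s = true
  · -- docx branch
    have hinf : "/docx/".toList <:+: s := (PySem.Chars.isIn_iff_infix _ _).mp hx
    have hnn : 0 ≤ PySem.Chars.find s "/docx/".toList :=
      (PySem.Chars.find_nonneg_iff _ _).mpr hinf
    have hne : PySem.Chars.find s "/docx/".toList ≠ -1 := by omega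
    rw [if_pos hx, if_neg hne, if_neg hne]
    rw [pvBody_eq doc "/docx/" (by decide) (hs ▸ hinf)]
    congr 2
    have hcast : PySem.Chars.find s "/docx/".toList + 6 =
        (((PySem.Chars.find s "/docx/".toList).toNat + 6 : Nat) : Int) := by omega
    rw [PySem.Str.toList_slice, hcast]
    rw [show PySem.Chars.slice doc.toList (some (((PySem.Chars.find s "/docx/".toList).toNat + 6 : Nat) : Int)) none
        = doc.toList.drop ((PySem.Chars.find s "/docx/".toList).toNat + 6) from
      PySem.List.slice_from_natCast _ _]
    rfl
  · -- no docx: i0 = -1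
    have hninf : ¬ "/docx/".toList <:+: s := by
      rw [← PySem.Chars.isIn_eq_false_iff]; simpa using hx
    have hi0 : PySem.Chars.find s "/docx/".toList = -1 := by
      rw [PySem.Chars.find_eq_neg_one_iff]; exact hninf
    rw [if_neg (by simpa using hx), if_pos hi0]
    by_cases hy : PySem.Chars.isIn "/docs/".toList s = true
    · have hinf : "/docs/".toList <:+: s := (PySem.Chars.isIn_iff_infix _ _).mp hy
      have hnn : 0 ≤ PySem.Chars.find s "/docs/".toList :=
        (PySem.Chars.find_nonneg_iff _ _).mpr hinf
      have hne : PySem.Chars.find s "/docs/".toList ≠ -1 := by omega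
      rw [if_pos hy, if_neg hne]
      rw [pvBody_eq doc "/docs/" (by decide) (hs ▸ hinf)]
      congr 2
      have hcast : PySem.Chars.find s "/docs/".toList + 6 =
          (((PySem.Chars.find s "/docs/".toList).toNat + 6 : Nat) : Int) := by omega
      rw [PySem.Str.toList_slice, hcast]
      rw [show PySem.Chars.slice doc.toList (some (((PySem.Chars.find s "/docs/".toList).toNat + 6 : Nat) : Int)) none
          = doc.toList.drop ((PySem.Chars.find s "/docs/".toList).toNat + 6) from
        PySem.List.slice_from_natCast _ _]
      rfl
    · have hninf' : ¬ "/docs/".toList <:+: s := by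
        rw [← PySem.Chars.isIn_eq_false_iff]; simpa using hy
      have hi1 : PySem.Chars.find s "/docs/".toList = -1 := by
        rw [PySem.Chars.find_eq_neg_one_iff]; exact hninf'
      rw [if_neg (by simpa using hy), if_pos hi1]
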